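-- pv_equiv track=rewrite | github.com/lucas-lankry/Options-Pricing-Calculator | livre2.py | sum_square_odd
-- ===== SOURCE A (Python) =====
-- def sum_square_odd(n):
--     total= 0
--     for i in range(1,n):
--         if (1 & i == 0) is False:
--             total += i*i
--         else:
--             total += 0
--     return total
-- ===== SOURCE B (Python) =====
-- def sum_square_odd(n):
--     k = max(0, n // 2)
--     return k * (2 * k - 1) * (2 * k + 1) // 3
-- ===== Notes on version B (the rewrite author's own statement) =====
-- stated objective: faster
-- what changed: Replaces A's linear loop over the range with a constant-time closed-form cubic polynomial in k = max(0, n // 2), the count of odd numbers below n, divided exactly by three.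
import Mathlib
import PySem

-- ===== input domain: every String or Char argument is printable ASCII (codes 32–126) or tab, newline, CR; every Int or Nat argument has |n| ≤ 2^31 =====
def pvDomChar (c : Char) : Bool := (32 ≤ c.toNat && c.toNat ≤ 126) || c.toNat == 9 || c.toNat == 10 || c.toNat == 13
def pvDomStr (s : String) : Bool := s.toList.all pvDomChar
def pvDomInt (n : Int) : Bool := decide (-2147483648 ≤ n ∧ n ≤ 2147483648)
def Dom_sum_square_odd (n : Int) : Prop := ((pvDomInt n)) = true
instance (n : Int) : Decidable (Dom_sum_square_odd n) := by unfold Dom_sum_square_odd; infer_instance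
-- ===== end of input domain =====

-- B replaces A's O(n) loop with the closed form k*(2k-1)*(2k+1)//3, k = max(0, n//2) (objective: faster).

-- ===== PORT A =====
def sum_square_odd (n : Int) : Int :=
  (PySem.List.pyRange 1 n 1).foldl
    (fun total i =>
      if (decide (PySem.Int.band 1 i = 0)) = false then total + i * i
      else total + 0) 0

-- ===== PORT B =====
def sum_square_odd_alt (n : Int) : Int :=
  let k := max 0 (PySem.Int.floordiv n 2)
  PySem.Int.floordiv (k * (2 * k - 1) * (2 * k + 1)) 3

-- ===== PRECONDITION & SPEC =====
def Spec_sum_square_odd (n : Int) (out : Int) : Prop := out = sum_square_odd_alt n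
instance (n : Int) (out : Int) : Decidable (Spec_sum_square_odd n out) := by unfold Spec_sum_square_odd; infer_instance

-- ===== CLAIM (what is proved, stated in full; the proofs are below) =====
def Claim_equal_sum_square_odd : Prop := ∀ (n : Int), Dom_sum_square_odd n → Spec_sum_square_odd n (sum_square_odd n)

-- ===== LEMMAS AND PROOFS =====

-- Python's `1 & i` is the parity bit of i (also for negative i, two's complement).
theorem band_one_parity (i : Int) : PySem.Int.band 1 i = i % 2 := by
  unfold PySem.Int.band
  rw [if_pos (by omega : (0:Int) ≤ 1)]
  have h1 : (1 : Int).toNat = 1 := rfl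
  by_cases h : 0 ≤ i
  · rw [if_pos h, h1, Nat.land_comm, Nat.and_one_is_mod]; omega
  · rw [if_neg h, h1, Nat.land_comm, Nat.and_one_is_mod]; omega

-- closed-form accumulator (proof-only helper)
def pvF (n : Int) : Int := (max 0 (n / 2)) * (2 * (max 0 (n / 2)) - 1) * (2 * (max 0 (n / 2)) + 1)

theorem key (m : Nat) : 3 * sum_square_odd (m : Int) = pvF (m : Int) := by
  induction m with
  | zero => decide
  | succ m ih =>
    unfold sum_square_odd at *
    by_cases hm : m = 0
    · subst hm; decide
    · have h1 : (1 : Int) ≤ (m : Int) := by omega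
      rw [show ((m + 1 : Nat) : Int) = (m : Int) + 1 by push_cast; ring,
          PySem.List.pyRange_one_succ_right (by omega : (1:Int) ≤ (m:Int)),
          List.foldl_append]
      simp only [List.foldl_cons, List.foldl_nil]
      rw [band_one_parity]
      rcases Nat.even_or_odd m with ⟨a, ha⟩ | ⟨a, ha⟩
      · have hmod : (m : Int) % 2 = 0 := by omega
        rw [hmod, if_neg (by decide), add_zero, ih]
        unfold pvF
        have hk : ((m : Int) + 1) / 2 = (m : Int) / 2 := by omega
        rw [hk]
      · have hmod : (m : Int) % 2 = 1 := by omega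
        rw [hmod, if_pos (by decide), mul_add, ih]
        unfold pvF
        have hk1 : max 0 ((m : Int) / 2) = (a : Int) := by omega
        have hk2 : max 0 (((m : Int) + 1) / 2) = (a : Int) + 1 := by omega
        rw [hk1, hk2]
        have hmi : (m : Int) = 2 * (a : Int) + 1 := by omega
        rw [hmi]; ring

theorem sum_square_odd_eq (n : Int) : sum_square_odd n = sum_square_odd_alt n := by
  unfold sum_square_odd_alt
  rw [PySem.Int.floordiv_eq_ediv_of_pos (by omega : (0:Int) < 2)]
  by_cases h : 0 ≤ n
  · have h3 : 3 * sum_square_odd n = pvF n := by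
      have := key n.toNat
      rwa [Int.toNat_of_nonneg h] at this
    unfold pvF at h3
    rw [PySem.Int.floordiv_eq_ediv_of_pos (by omega : (0:Int) < 3), ← h3,
        Int.mul_ediv_cancel_left _ (by omega : (3:Int) ≠ 0)]
  · have hnil : PySem.List.pyRange 1 n 1 = [] := PySem.List.pyRange_one_eq_nil (by omega)
    unfold sum_square_odd
    rw [hnil]
    have hk : max 0 (n / 2) = 0 := by omega
    rw [hk]
    decide

-- ===== VERDICT (by name: the statement is the Claim_ definition above) =====
theorem sum_square_odd_spec : Claim_equal_sum_square_odd := by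
  intro n _
  exact sum_square_odd_eq n
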